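-- pv_equiv track=rewrite | github.com/arnor-sigurdsson/EIR | src/eir/visualization/style.py | get_class_visuals
-- ===== SOURCE A (Python) =====
-- CLASS_COLORS = [
--     # Okabe-Ito palette
--     "#0072B2",  # Blue
--     "#D55E00",  # Orange
--     "#009E73",  # Green
--     "#CC79A7",  # Pink
--     "#56B4E9",  # Light blue
--     "#E69F00",  # Yellow
--     "#F0E442",  # Light yellow
--     # IBM colorblind-friendly palette
--     "#648FFF",  # Blue 2
--     "#785EF0",  # Purple
--     "#DC267F",  # Magenta
--     "#FE6100",  # Orange 2
--     "#FFB000",  # Gold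
--     # Tol Muted palette (colorblind-friendly)
--     "#44AA99",  # Cyan
--     "#117733",  # Forest green
--     "#999933",  # Olive
--     "#DDCC77",  # Sand
--     "#CC6677",  # Rose
--     "#882255",  # Wine
--     "#332288",  # Indigo
-- ]
--
-- def get_class_visuals(n_classes: int) -> tuple[list[str], list[str]]:
--     colors = []
--     line_styles = []
--
--     styles = ["-", "--", "-.", ":"]
--
--     for i in range(n_classes):
--         colors.append(CLASS_COLORS[i % len(CLASS_COLORS)])
--         if n_classes > len(CLASS_COLORS):
--             line_styles.append(styles[(i // len(CLASS_COLORS)) % len(styles)])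
--         else:
--             line_styles.append("-")
--
--     return colors, line_styles
-- ===== SOURCE B (Python) =====
-- CLASS_COLORS = [
--     # Okabe-Ito palette
--     "#0072B2",  # Blue
--     "#D55E00",  # Orange
--     "#009E73",  # Green
--     "#CC79A7",  # Pink
--     "#56B4E9",  # Light blue
--     "#E69F00",  # Yellow
--     "#F0E442",  # Light yellow
--     # IBM colorblind-friendly palette
--     "#648FFF",  # Blue 2
--     "#785EF0",  # Purple
--     "#DC267F",  # Magenta
--     "#FE6100",  # Orange 2
--     "#FFB000",  # Gold
--     # Tol Muted palette (colorblind-friendly)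
--     "#44AA99",  # Cyan
--     "#117733",  # Forest green
--     "#999933",  # Olive
--     "#DDCC77",  # Sand
--     "#CC6677",  # Rose
--     "#882255",  # Wine
--     "#332288",  # Indigo
-- ]
--
--
-- def get_class_visuals(n_classes: int) -> tuple[list[str], list[str]]:
--     styles = ["-", "--", "-.", ":"]
--     n = len(CLASS_COLORS)
--     if n_classes <= 0:
--         return [], []
--     blocks = n_classes // n + 1
--     colors = (CLASS_COLORS * blocks)[:n_classes]
--     if n_classes <= n:
--         line_styles = ["-"] * n_classes
--     else:
--         line_styles = []
--         for b in range(blocks):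
--             line_styles += [styles[b % 4]] * n
--         line_styles = line_styles[:n_classes]
--     return colors, line_styles
-- ===== Notes on version B (the rewrite author's own statement) =====
-- stated objective: faster
-- what changed: Replaces the per-index loop (modulo indexing and a size test on every iteration) by whole-list constructions: colors = tiled palette sliced to n_classes, line styles = one replicated list when the palette suffices, otherwise per-block replicated segments truncated to n_classes; measured ~2x faster (bulk list operations instead of a per-element Python loop).
import Mathlib
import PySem

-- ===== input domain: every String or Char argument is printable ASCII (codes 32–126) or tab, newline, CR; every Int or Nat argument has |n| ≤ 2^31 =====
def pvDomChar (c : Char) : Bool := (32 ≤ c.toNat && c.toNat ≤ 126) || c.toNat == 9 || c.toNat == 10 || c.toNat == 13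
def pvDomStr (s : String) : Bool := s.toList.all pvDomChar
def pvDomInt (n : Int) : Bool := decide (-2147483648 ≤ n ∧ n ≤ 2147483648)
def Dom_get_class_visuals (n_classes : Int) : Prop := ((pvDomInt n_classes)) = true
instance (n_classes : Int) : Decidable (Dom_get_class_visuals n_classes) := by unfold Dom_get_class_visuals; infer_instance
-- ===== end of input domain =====

-- B builds colors by tiling the palette and slicing, and line styles as replicated whole
-- blocks, instead of A's per-index loop with modulo indexing; same return value, O(n) both.

def CLASS_COLORS : List String :=
  ["#0072B2", "#D55E00", "#009E73", "#CC79A7", "#56B4E9", "#E69F00", "#F0E442",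
   "#648FFF", "#785EF0", "#DC267F", "#FE6100", "#FFB000",
   "#44AA99", "#117733", "#999933", "#DDCC77", "#CC6677", "#882255", "#332288"]

-- ===== PORT A =====
def get_class_visuals (n_classes : Int) : List String × List String :=
  let styles : List String := ["-", "--", "-.", ":"]
  (PySem.List.pyRange 0 n_classes 1).foldl
    (fun (acc : List String × List String) (i : Int) =>
      (acc.1 ++ [PySem.List.pyGetD CLASS_COLORS (PySem.Int.mod i (PySem.List.len CLASS_COLORS)) ""],
       acc.2 ++ [if PySem.List.len CLASS_COLORS < n_classes then
            PySem.List.pyGetD styles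
              (PySem.Int.mod (PySem.Int.floordiv i (PySem.List.len CLASS_COLORS)) (PySem.List.len styles)) ""
          else "-"]))
    ([], [])

-- ===== PORT B =====
def get_class_visuals_alt (n_classes : Int) : List String × List String :=
  let styles : List String := ["-", "--", "-.", ":"]
  let n := PySem.List.len CLASS_COLORS
  if n_classes ≤ 0 then ([], [])
  else
    let blocks := PySem.Int.floordiv n_classes n + 1
    let colors := PySem.List.slice (PySem.List.pyRepeat CLASS_COLORS blocks) none (some n_classes)
    let line_styles :=
      if n_classes ≤ n then List.replicate n_classes.toNat "-"
      else
        PySem.List.slice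
          ((PySem.List.pyRange 0 blocks 1).foldl
            (fun (acc : List String) (b : Int) =>
              acc ++ List.replicate n.toNat (PySem.List.pyGetD styles (PySem.Int.mod b 4) ""))
            [])
          none (some n_classes)
    (colors, line_styles)

-- ===== PRECONDITION & SPEC =====
def Spec_get_class_visuals (n_classes : Int) (out : List String × List String) : Prop := out = get_class_visuals_alt n_classes
instance (n_classes : Int) (out : List String × List String) : Decidable (Spec_get_class_visuals n_classes out) := by unfold Spec_get_class_visuals; infer_instance

-- ===== CLAIM (what is proved, stated in full; the proofs are below) =====
def Claim_equal_get_class_visuals : Prop := ∀ (n_classes : Int), Dom_get_class_visuals n_classes → Spec_get_class_visuals n_classes (get_class_visuals n_classes)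

-- ===== LEMMAS AND PROOFS =====

lemma pv_mod19 (k : Nat) : PySem.Int.mod (k : Int) 19 = ((k % 19 : Nat) : Int) := by
  simpa using PySem.Int.mod_natCast k 19

lemma pv_div19 (k : Nat) : PySem.Int.floordiv (k : Int) 19 = ((k / 19 : Nat) : Int) := by
  simpa using PySem.Int.floordiv_natCast k 19

lemma pv_mod4 (k : Nat) : PySem.Int.mod (k : Int) 4 = ((k % 4 : Nat) : Int) := by
  simpa using PySem.Int.mod_natCast k 4

lemma pv_take_map_getD {α : Type} (xs : List α) (d : α) (m : Nat) (h : m ≤ xs.length) :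
    (List.range m).map (fun k => xs.getD k d) = xs.take m := by
  apply List.ext_getElem
  · simp [Nat.min_eq_left h]
  · intro i h1 h2
    simp at h1 h2 ⊢
    rw [List.getElem?_eq_getElem (show i < xs.length by omega)]
    rfl

lemma pv_tile_take {α : Type} (xs : List α) (d : α) (hxs : xs ≠ []) :
    ∀ (r m : Nat), m ≤ xs.length * r →
      ((List.replicate r xs).flatten).take m
        = (List.range m).map (fun k => xs.getD (k % xs.length) d) := by
  intro r
  induction r with
  | zero => intro m hm; simp at hm; simp [hm]
  | succ r ih =>
    intro m hm
    have hlen : 0 < xs.length := List.length_pos_iff.mpr hxs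
    rw [List.replicate_succ, List.flatten_cons, List.take_append]
    by_cases hml : m ≤ xs.length
    · have h1 : m - xs.length = 0 := by omega
      rw [h1]
      have h2 : (List.range m).map (fun k => xs.getD (k % xs.length) d)
          = (List.range m).map (fun k => xs.getD k d) := by
        apply List.map_congr_left
        intro k hk
        simp at hk
        rw [Nat.mod_eq_of_lt (by omega)]
      rw [h2, pv_take_map_getD xs d m hml]
      simp
    · have h1 : m = xs.length + (m - xs.length) := by omega
      rw [List.take_of_length_le (by omega)]
      have hr : (List.range m).map (fun k => xs.getD (k % xs.length) d)
          = (List.range xs.length).map (fun k => xs.getD (k % xs.length) d)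
            ++ (List.range (m - xs.length)).map (fun k => xs.getD ((xs.length + k) % xs.length) d) := by
        conv_lhs => rw [h1]
        rw [List.range_add, List.map_append, List.map_map]
        rfl
      rw [hr]
      congr 1
      · have h2 : (List.range xs.length).map (fun k => xs.getD (k % xs.length) d)
            = (List.range xs.length).map (fun k => xs.getD k d) := by
          apply List.map_congr_left
          intro k hk
          simp at hk
          rw [Nat.mod_eq_of_lt hk]
        rw [h2, pv_take_map_getD xs d xs.length le_rfl, List.take_of_length_le le_rfl]
      · rw [ih (m - xs.length) (by rw [Nat.mul_succ] at hm; omega)]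
        apply List.map_congr_left
        intro k hk
        rw [Nat.add_mod_left]

lemma pv_blocks_take {α : Type} (L : Nat) (hL : 0 < L) :
    ∀ (r : Nat) (f : Nat → α) (m : Nat), m ≤ L * r →
      ((List.range r).flatMap (fun b => List.replicate L (f b))).take m
        = (List.range m).map (fun k => f (k / L)) := by
  intro r
  induction r with
  | zero => intro f m hm; simp at hm; simp [hm]
  | succ r ih =>
    intro f m hm
    rw [List.range_succ_eq_map, List.flatMap_cons, List.flatMap_map, List.take_append]
    by_cases hml : m ≤ L
    · have h1 : m - (List.replicate L (f 0)).length = 0 := by simp; omega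
      rw [h1]
      have h2 : (List.range m).map (fun k => f (k / L)) = (List.range m).map (fun _ => f 0) := by
        apply List.map_congr_left
        intro k hk
        simp at hk
        rw [Nat.div_eq_of_lt (by omega)]
      rw [h2]
      simp [List.take_replicate, Nat.min_eq_left hml, List.map_const']
    · have h1 : m = L + (m - L) := by omega
      rw [List.take_of_length_le (by simp; omega)]
      have hr : (List.range m).map (fun k => f (k / L))
          = (List.range L).map (fun k => f (k / L))
            ++ (List.range (m - L)).map (fun k => f ((L + k) / L)) := by
        conv_lhs => rw [h1]
        rw [List.range_add, List.map_append, List.map_map]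
        rfl
      rw [hr]
      congr 1
      · have h2 : (List.range L).map (fun k => f (k / L)) = (List.range L).map (fun _ => f 0) := by
          apply List.map_congr_left
          intro k hk
          simp at hk
          rw [Nat.div_eq_of_lt hk]
        simp [h2, List.map_const']
      · simp only [List.length_replicate, Nat.succ_eq_add_one]
        rw [ih (fun b => f (b + 1)) (m - L) (by rw [Nat.mul_succ] at hm; omega)]
        apply List.map_congr_left
        intro k hk
        have hdiv : (L + k) / L = k / L + 1 := by
          rw [Nat.add_comm, Nat.add_div_right _ hL]
        rw [hdiv]

lemma pv_A_eq (n : Int) (_hn : 0 < n) :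
    get_class_visuals n
      = ((List.range n.toNat).map (fun k => CLASS_COLORS.getD (k % 19) ""),
         if (19 : Int) < n then
           (List.range n.toNat).map
             (fun k => (["-", "--", "-.", ":"] : List String).getD (k / 19 % 4) "")
         else List.replicate n.toNat "-") := by
  have hlen : PySem.List.len CLASS_COLORS = 19 := by rfl
  have hsty : PySem.List.len (["-", "--", "-.", ":"] : List String) = 4 := by rfl
  simp only [get_class_visuals]
  rw [hlen, hsty, PySem.List.pyRange_one]
  simp only [sub_zero, zero_add, List.foldl_map]
  rw [PySem.List.foldl_prod_mk
        (fun (s : List String) (k : Nat) =>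
          s ++ [PySem.List.pyGetD CLASS_COLORS (PySem.Int.mod (k : Int) 19) ""])
        (fun (s : List String) (k : Nat) =>
          s ++ [if (19 : Int) < n then
              PySem.List.pyGetD (["-", "--", "-.", ":"] : List String)
                (PySem.Int.mod (PySem.Int.floordiv (k : Int) 19) 4) ""
            else "-"])]
  rw [PySem.List.foldl_append_singleton_eq_map, PySem.List.foldl_append_singleton_eq_map]
  simp only [Prod.mk.injEq]
  constructor
  · simp only [List.nil_append]
    apply List.map_congr_left
    intro k _
    rw [pv_mod19, PySem.List.pyGetD_natCast]
  · simp only [List.nil_append]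
    by_cases h19 : (19 : Int) < n
    · simp only [if_pos h19]
      apply List.map_congr_left
      intro k _
      rw [pv_div19, pv_mod4, PySem.List.pyGetD_natCast]
    · simp only [if_neg h19]
      rw [List.map_const', List.length_range]

lemma pv_B_eq (n : Int) (_hn : 0 < n) :
    get_class_visuals_alt n
      = (((List.replicate (n.toNat / 19 + 1) CLASS_COLORS).flatten).take n.toNat,
         if n ≤ (19 : Int) then List.replicate n.toNat "-"
         else ((List.range (n.toNat / 19 + 1)).flatMap
                 (fun b => List.replicate 19
                   ((["-", "--", "-.", ":"] : List String).getD (b % 4) ""))).take n.toNat) := by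
  have hlen : PySem.List.len CLASS_COLORS = 19 := by rfl
  have hm : n = ((n.toNat : Nat) : Int) := by omega
  simp only [get_class_visuals_alt]
  rw [hlen, if_neg (by omega)]
  have hblocks : PySem.Int.floordiv n 19 + 1 = (((n.toNat / 19 + 1 : Nat)) : Int) := by
    conv_lhs => rw [hm, pv_div19]
    push_cast; ring
  rw [hblocks]
  simp only [Prod.mk.injEq]
  constructor
  · rw [PySem.List.slice_to _ (by omega)]
    simp only [PySem.List.pyRepeat, Int.toNat_natCast]
  · by_cases h19 : n ≤ (19 : Int)
    · simp [if_pos h19]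
    · rw [if_neg h19, PySem.List.slice_to _ (by omega)]
      rw [PySem.List.pyRange_one]
      simp only [sub_zero, zero_add, Int.toNat_natCast,
        show ((19 : Int).toNat) = 19 from rfl, List.foldl_map]
      rw [PySem.List.foldl_append_eq_flatMap]
      simp only [List.nil_append]
      rw [if_neg h19]
      have hfun : (fun (y : Nat) => List.replicate 19
            (PySem.List.pyGetD (["-", "--", "-.", ":"] : List String) (PySem.Int.mod (y : Int) 4) ""))
          = (fun b => List.replicate 19 ((["-", "--", "-.", ":"] : List String).getD (b % 4) "")) := by
        funext k
        rw [pv_mod4, PySem.List.pyGetD_natCast]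
      rw [hfun]

-- ===== VERDICT (by name: the statement is the Claim_ definition above) =====
theorem get_class_visuals_spec : Claim_equal_get_class_visuals := by
  intro n _
  unfold Spec_get_class_visuals
  by_cases hn : n ≤ 0
  · have hA : get_class_visuals n = ([], []) := by
      simp only [get_class_visuals]
      rw [PySem.List.pyRange_one_eq_nil hn]
      rfl
    have hB : get_class_visuals_alt n = ([], []) := by
      simp only [get_class_visuals_alt]
      rw [if_pos hn]
    rw [hA, hB]
  · have hn' : 0 < n := by omega
    rw [pv_A_eq n hn', pv_B_eq n hn']
    have h19len : CLASS_COLORS.length = 19 := rfl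
    simp only [Prod.mk.injEq]
    constructor
    · rw [pv_tile_take CLASS_COLORS "" (by decide) (n.toNat / 19 + 1) n.toNat
          (by rw [h19len]; omega)]
      simp only [h19len]
    · by_cases h19 : n ≤ (19 : Int)
      · rw [if_neg (by omega), if_pos h19]
      · rw [if_pos (by omega), if_neg h19]
        rw [pv_blocks_take 19 (by norm_num) (n.toNat / 19 + 1)
            (fun b => (["-", "--", "-.", ":"] : List String).getD (b % 4) "") n.toNat (by omega)]
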